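-- pv_equiv track=rewrite | github.com/mellena1/UnDockerize | undockerize/undockerize.py | square_brackets_split
-- ===== SOURCE A (Python) =====
-- def square_brackets_split(cmd):
--     """
--     Breaks the square brackets notation into srcs and dest
--     """
--     cmd = cmd[1:-1]  # remove square brackets
--     open_quote = False
--     split_cmd = []
--
--     word = ''
--     for char in cmd:
--         if char == '"':
--             open_quote = not open_quote
--         if open_quote and char != '"':
--             if char == ' ':
--                 word += '\\'  # escape spaces
--             word += char
--         if not open_quote and char == '"':
--             split_cmd.append(word)
--             word = ''
--     return split_cmd[:-1], split_cmd[-1]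
-- ===== SOURCE B (Python) =====
-- def square_brackets_split(cmd):
--     """
--     Breaks the square brackets notation into srcs and dest
--     """
--     words = _quoted(cmd[1:-1])
--     return words[:-1], words[-1]
--
--
-- def _quoted(s):
--     """Collect the contents of each fully-closed pair of quotes, escaping spaces."""
--     i = s.find('"')
--     if i == -1:
--         return []
--     rest = s[i + 1:]
--     j = rest.find('"')
--     if j == -1:
--         return []
--     return [rest[:j].replace(' ', '\\ ')] + _quoted(rest[j + 1:])
-- ===== Notes on version B (the rewrite author's own statement) =====
-- stated objective: alternative
-- what changed: Replaced the character-by-character open_quote state machine with a recursive descent that repeatedly finds the next pair of quotes with str.find and slices out the quoted content, escaping spaces with str.replace.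
import Mathlib
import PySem

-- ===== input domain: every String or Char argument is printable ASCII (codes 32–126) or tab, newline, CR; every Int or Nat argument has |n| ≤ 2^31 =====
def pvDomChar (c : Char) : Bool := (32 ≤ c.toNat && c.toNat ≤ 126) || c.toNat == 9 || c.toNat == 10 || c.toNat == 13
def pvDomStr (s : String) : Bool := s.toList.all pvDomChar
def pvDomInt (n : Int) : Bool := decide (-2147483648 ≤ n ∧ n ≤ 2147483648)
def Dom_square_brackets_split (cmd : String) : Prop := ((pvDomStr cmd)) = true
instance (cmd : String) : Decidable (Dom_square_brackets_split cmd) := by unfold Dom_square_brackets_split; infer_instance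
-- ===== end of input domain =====

-- B replaces A's per-character open_quote state machine by a recursive descent that
-- finds each closed pair of quotes with str.find and slices out its content (alternative
-- decomposition, same cost); the RETURN values agree on Pre_ (A raises IndexError elsewhere).

-- ===== PORT A =====
-- body of A's for-loop over the bracket-stripped string, state (open_quote, split_cmd, word)
def sbsLoop (st : Bool × List (List Char) × List Char) (c : Char) : Bool × List (List Char) × List Char :=
  let oq := if c = '"' then !st.1 else st.1                      -- open_quote = not open_quote
  let w := if oq = true ∧ c ≠ '"' then st.2.2 ++ (if c = ' ' then ['\\', ' '] else [c]) else st.2.2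
  if oq = false ∧ c = '"' then (oq, st.2.1 ++ [w], []) else (oq, st.2.1, w)

def square_brackets_split (cmd : String) : List String × String :=
  let cmd2 := PySem.List.slice cmd.toList (some 1) (some (-1))  -- cmd[1:-1]
  let st := cmd2.foldl sbsLoop (false, [], [])
  let sc := st.2.1
  ((PySem.List.slice sc none (some (-1))).map String.ofList,    -- split_cmd[:-1]
   (((PySem.List.pyGet? sc (-1)).map String.ofList).getD ""))   -- split_cmd[-1]; none = IndexError, excluded by Pre_

-- ===== PORT B =====
-- characterisation of s.find('"') (first occurrence), needed by quotedChars' termination proof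
lemma find_char_spec (s : List Char) (c : Char) (h : ¬ PySem.Chars.find s [c] = -1) :
    ∃ n : Nat, PySem.Chars.find s [c] = (n : Int) ∧ n < s.length ∧
      s.drop n = c :: s.drop (n + 1) ∧ c ∉ s.take n := by
  have hspec := PySem.Chars.findFrom_natCast_spec s [c] 0 (Nat.zero_le _)
  rw [Nat.cast_zero, PySem.Chars.findFrom_zero] at hspec
  obtain ⟨hle, hpre, hmin⟩ := hspec h
  refine ⟨(PySem.Chars.find s [c]).toNat, (Int.toNat_of_nonneg hle).symm, ?_, ?_, ?_⟩
  · obtain ⟨t, ht⟩ := hpre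
    have hne : s.drop (PySem.Chars.find s [c]).toNat ≠ [] := by simp [← ht]
    rw [ne_eq, List.drop_eq_nil_iff] at hne
    omega
  · obtain ⟨t, ht⟩ := hpre
    have htail : s.drop ((PySem.Chars.find s [c]).toNat + 1) = t := by
      rw [← List.drop_drop]
      simp [← ht]
    rw [htail, ← ht]; rfl
  · intro hc
    obtain ⟨m, hm, hget⟩ := List.mem_iff_getElem.mp hc
    have hmlt : m < (PySem.Chars.find s [c]).toNat := lt_of_lt_of_le hm (by simp)
    have hmlen : m < s.length := by
      have := List.length_take (i := (PySem.Chars.find s [c]).toNat) (l := s); omega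
    refine hmin m (Nat.zero_le _) hmlt ⟨s.drop (m+1), ?_⟩
    rw [List.getElem_take] at hget
    rw [← hget]
    exact (List.drop_eq_getElem_cons hmlen).symm

-- port of _quoted (on the char list; PySem.Str.* are thin wrappers over these Chars functions)
def quotedChars (s : List Char) : List String :=
  let i := PySem.Chars.find s ['"']                             -- i = s.find('"')
  if hi : i = -1 then []
  else
    let rest := PySem.List.slice s (some (i + 1)) none          -- rest = s[i+1:]
    let j := PySem.Chars.find rest ['"']                        -- j = rest.find('"')
    if hj : j = -1 then []
    else                                                        -- rest[:j].replace(' ', '\\ ')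
      String.ofList (PySem.Chars.replace (PySem.List.slice rest none (some j)) [' '] ['\\', ' '])
        :: quotedChars (PySem.List.slice rest (some (j + 1)) none)   -- _quoted(rest[j+1:])
termination_by s.length
decreasing_by
  obtain ⟨n, hn, hnlt, -, -⟩ := find_char_spec s '"' hi
  have hrest : PySem.List.slice s (some ((n : Int) + 1)) none = s.drop (n + 1) := by
    rw [PySem.List.slice_from _ (by omega)]
    norm_num
  have hj' : ¬ PySem.Chars.find (List.drop (n + 1) s) ['"'] = -1 := by
    rw [← hrest, ← hn]; exact hj
  simp only [hn, hrest]
  obtain ⟨m, hm, hmlt, -, -⟩ := find_char_spec _ '"' hj'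
  rw [hm, PySem.List.slice_from _ (by omega)]
  have h1 : ((m : Int) + 1).toNat = m + 1 := by omega
  rw [h1]
  simp at hmlt ⊢
  omega

def square_brackets_split_alt (cmd : String) : List String × String :=
  let words := quotedChars (PySem.List.slice cmd.toList (some 1) (some (-1)))  -- _quoted(cmd[1:-1])
  (PySem.List.slice words none (some (-1)),                     -- words[:-1]
   ((PySem.List.pyGet? words (-1)).getD ""))                    -- words[-1]; none = IndexError, excluded by Pre_

-- ===== PRECONDITION & SPEC =====
-- Pre_ excludes exactly the inputs on which Python A raises IndexError: fewer than two
-- quote characters inside cmd[1:-1], so no quoted word ever closes and split_cmd[-1] fails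
-- (B's words[-1] raises the same IndexError there).
def Pre_square_brackets_split (cmd : String) : Prop :=
  2 ≤ (PySem.List.slice cmd.toList (some 1) (some (-1))).count '"'
instance (cmd : String) : Decidable (Pre_square_brackets_split cmd) := by
  unfold Pre_square_brackets_split; infer_instance

def pvWitness_square_brackets_split : String := "[\"a b\" \"c\"]"

def Spec_square_brackets_split (cmd : String) (out : List String × String) : Prop := out = square_brackets_split_alt cmd
instance (cmd : String) (out : List String × String) : Decidable (Spec_square_brackets_split cmd out) := by unfold Spec_square_brackets_split; infer_instance

-- ===== CLAIM (what is proved, stated in full; the proofs are below) =====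
def Claim_equal_square_brackets_split : Prop := ∀ (cmd : String), Dom_square_brackets_split cmd → Pre_square_brackets_split cmd → Spec_square_brackets_split cmd (square_brackets_split cmd)

-- ===== LEMMAS AND PROOFS =====

-- the space-escaping of a single character, as A's loop performs it
def escChar (c : Char) : List Char := if c = ' ' then ['\\', ' '] else [c]

lemma loop_skip (s : List Char) (acc : List (List Char)) (w : List Char) (h : '"' ∉ s) :
    s.foldl sbsLoop (false, acc, w) = (false, acc, w) := by
  induction s with
  | nil => rfl
  | cons c t ih =>
    have hc : ¬ c = '"' := by rintro rfl; exact h (List.mem_cons_self)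
    have ht : '"' ∉ t := fun hm => h (List.mem_cons_of_mem _ hm)
    have hstep : sbsLoop (false, acc, w) c = (false, acc, w) := by simp [sbsLoop, hc]
    rw [List.foldl_cons, hstep, ih ht]

lemma loop_in (s : List Char) (acc : List (List Char)) (w : List Char) (h : '"' ∉ s) :
    s.foldl sbsLoop (true, acc, w) = (true, acc, w ++ s.flatMap escChar) := by
  induction s generalizing w with
  | nil => simp
  | cons c t ih =>
    have hc : ¬ c = '"' := by rintro rfl; exact h (List.mem_cons_self)
    have ht : '"' ∉ t := fun hm => h (List.mem_cons_of_mem _ hm)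
    have hstep : sbsLoop (true, acc, w) c = (true, acc, w ++ escChar c) := by
      simp [sbsLoop, hc, escChar]
    rw [List.foldl_cons, hstep, ih _ ht, List.flatMap_cons, List.append_assoc]

lemma replace_go_char (c : Char) (new : List Char) :
    ∀ (fuel : Nat) (l acc : List Char), l.length ≤ fuel →
      PySem.Chars.replace.go [c] new fuel l acc = acc.reverse ++ l.flatMap (fun x => if x = c then new else [x]) := by
  intro fuel
  induction fuel with
  | zero =>
    intro l acc hl
    have : l = [] := List.length_eq_zero_iff.mp (Nat.le_zero.mp hl)
    subst this; simp [PySem.Chars.replace.go]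
  | succ fuel ih =>
    intro l acc hl
    match l with
    | [] => simp [PySem.Chars.replace.go]
    | x :: t =>
      simp only [PySem.Chars.replace.go]
      by_cases hx : x = c
      · subst hx
        rw [if_pos (by simp [List.isPrefixOf])]
        simp only [List.length_cons] at hl
        rw [ih _ _ (by simpa using hl)]
        simp
      · rw [if_neg (by simp [List.isPrefixOf]; exact fun h => hx h.symm)]
        simp only [List.length_cons] at hl
        rw [ih _ _ (by omega)]
        simp [hx]

-- Python's s.replace(old, new) for a single-character old is character-wise substitution
lemma replace_char (s : List Char) (c : Char) (new : List Char) :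
    PySem.Chars.replace s [c] new = s.flatMap (fun x => if x = c then new else [x]) := by
  rw [PySem.Chars.replace]
  simp only [List.isEmpty_cons, Bool.false_eq_true, if_false]
  simpa using replace_go_char c new s.length s [] le_rfl

lemma find_neg_one_not_mem (s : List Char) (c : Char) (h : PySem.Chars.find s [c] = -1) : c ∉ s := by
  rw [PySem.Chars.find_eq_neg_one_iff] at h
  simpa [List.singleton_infix_iff] using h

-- A's loop, started outside quotes with an empty word, appends exactly B's quoted words
lemma loop_quoted_aux : ∀ (N : Nat) (s : List Char), s.length ≤ N → ∀ (acc : List (List Char)),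
    (s.foldl sbsLoop (false, acc, [])).2.1 = acc ++ (quotedChars s).map String.toList := by
  intro N
  induction N with
  | zero =>
    intro s hs acc
    have hnil : s = [] := List.length_eq_zero_iff.mp (Nat.le_zero.mp hs)
    subst hnil
    rw [quotedChars]
    simp [PySem.Chars.find, PySem.Chars.find.go]
  | succ N ih =>
    intro s hs acc
    by_cases hi : PySem.Chars.find s ['"'] = -1
    · rw [loop_skip _ _ _ (find_neg_one_not_mem _ _ hi), quotedChars, dif_pos hi]
      simp
    · obtain ⟨n, hn, hnlt, hdrop, hntake⟩ := find_char_spec s '"' hi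
      have hsplit : s = s.take n ++ '"' :: s.drop (n + 1) := by
        conv_lhs => rw [← List.take_append_drop n s]
        rw [hdrop]
      have hrest : PySem.List.slice s (some ((n : Int) + 1)) none = s.drop (n + 1) := by
        rw [PySem.List.slice_from _ (by omega)]; norm_num
      have hstep1 : sbsLoop (false, acc, []) '"' = (true, acc, []) := by simp [sbsLoop]
      conv_lhs => rw [hsplit]
      rw [List.foldl_append, loop_skip _ _ _ hntake, List.foldl_cons, hstep1]
      by_cases hj : PySem.Chars.find (s.drop (n + 1)) ['"'] = -1
      · rw [loop_in _ _ _ (find_neg_one_not_mem _ _ hj)]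
        have hqs : quotedChars s = [] := by
          rw [quotedChars, dif_neg hi]
          simp only [hn, hrest, dif_pos hj]
        rw [hqs]
        simp
      · obtain ⟨m, hm, hmlt, hdrop2, hmtake⟩ := find_char_spec _ '"' hj
        have hsplit2 : s.drop (n + 1) = (s.drop (n + 1)).take m ++ '"' :: (s.drop (n + 1)).drop (m + 1) := by
          conv_lhs => rw [← List.take_append_drop m (s.drop (n + 1))]
          rw [hdrop2]
        have hstep2 : ∀ w, sbsLoop (true, acc, w) '"' = (false, acc ++ [w], []) := by
          intro w; simp [sbsLoop]
        have ihlen : ((s.drop (n + 1)).drop (m + 1)).length ≤ N := by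
          simp only [List.length_drop]
          omega
        conv_lhs => rw [hsplit2]
        rw [List.foldl_append, loop_in _ _ _ hmtake, List.foldl_cons, hstep2, ih _ ihlen]
        have htake : PySem.List.slice (s.drop (n + 1)) none (some ((m : Int))) = (s.drop (n + 1)).take m := by
          rw [PySem.List.slice_to _ (by omega)]; norm_num
        have hrest2 : PySem.List.slice (s.drop (n + 1)) (some ((m : Int) + 1)) none = (s.drop (n + 1)).drop (m + 1) := by
          rw [PySem.List.slice_from _ (by omega)]; norm_num
        have hqs : quotedChars s =
            String.ofList (((s.drop (n + 1)).take m).flatMap escChar)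
              :: quotedChars ((s.drop (n + 1)).drop (m + 1)) := by
          rw [quotedChars, dif_neg hi]
          simp only [hn, hrest, hm, htake, hrest2]
          rw [dif_neg (by omega : ¬ (m : Int) = -1), replace_char]
          have he : (fun x => if x = ' ' then ['\\', ' '] else [x]) = escChar := by
            funext x; simp [escChar]
          rw [he]
        rw [hqs]
        simp

lemma pyGet?_map_helper {α β : Type} (f : α → β) (l : List α) (i : Int) :
    PySem.List.pyGet? (l.map f) i = (PySem.List.pyGet? l i).map f := by
  simp [PySem.List.pyGet?, PySem.List.pyIdx?]

-- ===== VERDICT (by name: the statement is the Claim_ definition above) =====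
theorem square_brackets_split_spec : Claim_equal_square_brackets_split := by
  intro cmd _hdom _hpre
  unfold Spec_square_brackets_split square_brackets_split square_brackets_split_alt
  simp only []
  show (_, _) = (_, _)
  have hsc := loop_quoted_aux (PySem.List.slice cmd.toList (some 1) (some (-1))).length
      (PySem.List.slice cmd.toList (some 1) (some (-1))) le_rfl []
  rw [hsc]
  simp only [List.nil_append, Prod.mk.injEq]
  constructor
  · rw [PySem.List.slice_to_neg_one, PySem.List.slice_to_neg_one, ← List.map_dropLast]
    simp [List.map_map, Function.comp_def]
  · rw [pyGet?_map_helper]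
    cases PySem.List.pyGet? (quotedChars (PySem.List.slice cmd.toList (some 1) (some (-1)))) (-1) <;> simp
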